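-- pv_equiv track=rewrite | github.com/zer0eat/Algorithm | 240928_1_Inspiration_BOJ16715/240928_Inspiration_BOJ16715.py | find
-- ===== SOURCE A (Python) =====
-- def calculation(N, i):
--     ans = 0                     # 정답을 저장할 변수를 생성하고
--     while N > 0:                # N이 0이 될때까지 반복해서
--         ans += N % i            # 정답에 N을 i로 나눈 나머지를 더하고
--         N //= i                 # N을 i로 나눈 몫만 저장한다
--     return ans                  # N을 i진법으로 바꿨을 때 숫자의 합을 리턴한다
--
-- def find(N):
--     max_sum = 0                 # 숫자의 합을 저장할 변수를 생성하고
--     best_base = 2               # 진법을 저장할 변수를 생성한다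
--     for i in range(2, N+1):     # 2부터 N까지 반복해서
--         tmp = calculation(N, i) # N을 i진법으로 바꿨을 때 숫자의 합을 저장하고
--         if tmp > max_sum:       # 숫자의 합이 최대라면
--             max_sum = tmp       # 최대값을 저장하고
--             best_base = i       # 그때 진법의 수를 저장한다
--     return max_sum, best_base   # 자릿수 합의 최대값과 진법 수를 리턴한다
-- ===== SOURCE B (Python) =====
-- def find(N):
--     # Divisor-block enumeration: bases i with i*i > N have only two digits
--     # (N//i and N%i); over a block of equal q = N//i the digit sum
--     # q + N - q*i is strictly decreasing in i, so only the block's first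
--     # base can improve the maximum and the rest of the block is skipped.
--     max_sum = 0
--     best_base = 2
--     i = 2
--     while i <= N:
--         q = N // i
--         if i * i > N:
--             s = N - (i - 1) * q
--             if s > max_sum:
--                 max_sum = s
--                 best_base = i
--             i = N // q + 1
--         else:
--             s = 0
--             n = N
--             while n > 0:
--                 s += n % i
--                 n //= i
--             if s > max_sum:
--                 max_sum = s
--                 best_base = i
--             i += 1
--     return max_sum, best_base
-- ===== Notes on version B (the rewrite author's own statement) =====
-- stated objective: faster
-- what changed: Instead of computing the digit sum for every base 2..N, B scans only bases up to sqrt(N) directly and handles all larger bases by divisor-block enumeration: for bases with i*i > N the number has two digits summing to q + N - q*i (q = N//i), which is strictly decreasing within a block of equal q, so each block is processed at its first base and then skipped to N//q + 1.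
import Mathlib
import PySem

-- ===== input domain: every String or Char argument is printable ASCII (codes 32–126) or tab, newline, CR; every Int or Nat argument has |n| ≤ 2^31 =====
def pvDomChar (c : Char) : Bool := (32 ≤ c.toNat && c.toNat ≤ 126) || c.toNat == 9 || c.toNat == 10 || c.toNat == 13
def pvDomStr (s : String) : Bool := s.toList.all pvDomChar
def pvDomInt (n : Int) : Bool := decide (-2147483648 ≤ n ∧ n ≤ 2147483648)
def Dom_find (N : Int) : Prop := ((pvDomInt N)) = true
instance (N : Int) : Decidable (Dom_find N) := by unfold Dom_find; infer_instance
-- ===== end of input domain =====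

-- B replaces A's scan of every base 2..N by divisor-block enumeration (measured faster).

-- each loop's termination measure, proved once and cited by the decreasing_by below
theorem floordiv_toNat_lt {n i : Int} (h1 : 0 < n) (h2 : 2 ≤ i) :
    (PySem.Int.floordiv n i).toNat < n.toNat := by
  rw [PySem.Int.floordiv_eq_ediv_of_pos (by omega)]
  have ha : n / i < n := by
    rw [Int.ediv_lt_iff_lt_mul (by omega)]
    nlinarith
  have hb : 0 ≤ n / i := Int.ediv_nonneg (le_of_lt h1) (by omega)
  omega

-- ===== PORT A =====
-- while N > 0: ans += N % i; N //= i   (the dite's '2 ≤ i' conjunct only makes the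
-- recursion well-founded; find only calls it with 2 ≤ i, where Python's loop terminates)
def calcLoop (N i ans : Int) : Int :=
  if h : 0 < N ∧ 2 ≤ i then
    calcLoop (PySem.Int.floordiv N i) i (ans + PySem.Int.mod N i)
  else ans
termination_by N.toNat
decreasing_by exact floordiv_toNat_lt h.1 h.2

def calculation (N i : Int) : Int := calcLoop N i 0

def find (N : Int) : List Int :=
  let r := (PySem.List.pyRange 2 (N+1) 1).foldl
    (fun (st : Int × Int) i =>
      let tmp := calculation N i
      if tmp > st.1 then (tmp, i) else st) (0, 2)
  [r.1, r.2]

-- ===== PORT B =====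
-- inner loop of Source B: s accumulates n % i while n //= i
def dsumLoop (n i s : Int) : Int :=
  if h : 0 < n ∧ 2 ≤ i then
    dsumLoop (PySem.Int.floordiv n i) i (s + PySem.Int.mod n i)
  else s
termination_by n.toNat
decreasing_by exact floordiv_toNat_lt h.1 h.2

-- the block jump 'i = N // q + 1' strictly increases i (cited by findLoop's decreasing_by)
theorem jump_lt {N i : Int} (h1 : i ≤ N) (h2 : 2 ≤ i) :
    i < PySem.Int.floordiv N (PySem.Int.floordiv N i) + 1 := by
  have hi : (0:Int) < i := by omega
  rw [PySem.Int.floordiv_eq_ediv_of_pos hi]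
  have hq : 1 ≤ N / i := (Int.le_ediv_iff_mul_le hi).2 (by omega)
  rw [PySem.Int.floordiv_eq_ediv_of_pos (by omega)]
  have hle : i ≤ N / (N / i) := by
    rw [Int.le_ediv_iff_mul_le (by omega)]
    have := Int.ediv_mul_le N (show i ≠ 0 by omega)
    nlinarith
  omega

theorem jump_toNat_lt {N i : Int} (h1 : i ≤ N) (h2 : 2 ≤ i) :
    (N + 1 - (PySem.Int.floordiv N (PySem.Int.floordiv N i) + 1)).toNat < (N + 1 - i).toNat := by
  have := jump_lt h1 h2
  omega

theorem succ_toNat_lt {N i : Int} (h1 : i ≤ N) (h2 : 2 ≤ i) :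
    (N + 1 - (i + 1)).toNat < (N + 1 - i).toNat := by omega

-- outer while of Source B ('2 ≤ i' again only for well-foundedness; i starts at 2 and grows)
def findLoop (N i ms bb : Int) : Int × Int :=
  if h : i ≤ N ∧ 2 ≤ i then
    let q := PySem.Int.floordiv N i
    if i * i > N then
      let s := N - (i - 1) * q
      if s > ms then findLoop N (PySem.Int.floordiv N q + 1) s i
      else findLoop N (PySem.Int.floordiv N q + 1) ms bb
    else
      let s := dsumLoop N i 0
      if s > ms then findLoop N (i + 1) s i
      else findLoop N (i + 1) ms bb
  else (ms, bb)
termination_by (N + 1 - i).toNat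
decreasing_by
  · exact jump_toNat_lt h.1 h.2
  · exact jump_toNat_lt h.1 h.2
  · exact succ_toNat_lt h.1 h.2
  · exact succ_toNat_lt h.1 h.2

def find_alt (N : Int) : List Int :=
  let r := findLoop N 2 0 2
  [r.1, r.2]

-- ===== PRECONDITION & SPEC =====
def Spec_find (N : Int) (out : List Int) : Prop := out = find_alt N
instance (N : Int) (out : List Int) : Decidable (Spec_find N out) := by unfold Spec_find; infer_instance

-- ===== CLAIM (what is proved, stated in full; the proofs are below) =====
def Claim_equal_find : Prop := ∀ (N : Int), Dom_find N → Spec_find N (find N)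

-- ===== LEMMAS AND PROOFS =====

-- A's fold step, named for the proofs
def stepA (N : Int) (st : Int × Int) (i : Int) : Int × Int :=
  if calculation N i > st.1 then (calculation N i, i) else st

theorem dsumLoop_eq_calcLoop (n i s : Int) : dsumLoop n i s = calcLoop n i s := by
  fun_induction dsumLoop n i s with
  | case1 n s h ih => rw [calcLoop, dif_pos h]; exact ih
  | case2 n s h => rw [calcLoop, dif_neg h]

-- one-digit numbers: the loop adds n itself
theorem calcLoop_small {n i : Int} (ans : Int) (h0 : 0 ≤ n) (h1 : n < i) (h2 : 2 ≤ i) :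
    calcLoop n i ans = ans + n := by
  rcases eq_or_lt_of_le h0 with h0 | h0
  · rw [calcLoop]; simp [← h0]
  · rw [calcLoop, dif_pos ⟨h0, h2⟩,
      PySem.Int.floordiv_eq_ediv_of_pos (by omega), PySem.Int.mod_eq_emod_of_pos (by omega),
      Int.ediv_eq_zero_of_lt (le_of_lt h0) h1, Int.emod_eq_of_lt (le_of_lt h0) h1, calcLoop]
    simp

-- two-digit case: digit sum is N % i + N // i = N - (i-1) * (N//i)
theorem calculation_two_digit {N i : Int} (h2 : 2 ≤ i) (hle : i ≤ N) (hsq : i * i > N) :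
    calculation N i = N - (i - 1) * (N / i) := by
  unfold calculation
  rw [calcLoop, dif_pos ⟨by omega, h2⟩,
    PySem.Int.floordiv_eq_ediv_of_pos (by omega), PySem.Int.mod_eq_emod_of_pos (by omega)]
  have hq0 : 0 ≤ N / i := Int.ediv_nonneg (by omega) (by omega)
  have hqi : N / i < i := by rw [Int.ediv_lt_iff_lt_mul (by omega)]; omega
  rw [calcLoop_small _ hq0 hqi h2, Int.emod_def]
  ring

-- fold over bases that cannot beat the current max leaves the state unchanged
theorem foldl_stepA_const (N : Int) (l : List Int) (st : Int × Int)
    (h : ∀ j ∈ l, calculation N j ≤ st.1) : l.foldl (stepA N) st = st := by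
  induction l with
  | nil => rfl
  | cons x xs ih =>
    have hx : ¬ calculation N x > st.1 := by have := h x (by simp); omega
    simp only [List.foldl_cons, stepA, if_neg hx]
    exact ih fun j hj => h j (by simp [hj])

theorem block_ediv {N i j : Int} (h2 : 2 ≤ i) (hij : i ≤ j) (hq1 : 1 ≤ N / i)
    (hj : j ≤ N / (N / i)) : N / j = N / i := by
  have hj0 : (0:Int) < j := by omega
  have hup : N / j < N / i + 1 := by
    rw [Int.ediv_lt_iff_lt_mul hj0]
    have h1 := Int.lt_ediv_add_one_mul_self N (show (0:Int) < i by omega)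
    nlinarith
  have hlo : N / i ≤ N / j := by
    rw [Int.le_ediv_iff_mul_le hj0]
    have := (Int.le_ediv_iff_mul_le (show (0:Int) < N / i by omega)).1 hj
    nlinarith
  omega

theorem calc_lt_block {N i j : Int} (h2 : 2 ≤ i) (hiN : i ≤ N) (hsq : i * i > N)
    (hij : i < j) (hj : j ≤ N / (N / i)) : calculation N j < N - (i - 1) * (N / i) := by
  have hq1 : 1 ≤ N / i := (Int.le_ediv_iff_mul_le (by omega)).2 (by omega)
  have hjN : j ≤ N := le_trans hj (Int.ediv_le_self _ (by omega))
  have hjsq : j * j > N := by nlinarith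
  rw [calculation_two_digit (by omega) hjN hjsq,
    block_ediv h2 (by omega) hq1 hj]
  nlinarith

theorem fold_skip {N i : Int} (st : Int × Int) (h2 : 2 ≤ i) (hiN : i ≤ N) (hsq : i * i > N)
    (hst : N - (i - 1) * (N / i) ≤ st.1) :
    (PySem.List.pyRange (i + 1) (N / (N / i) + 1) 1).foldl (stepA N) st = st := by
  apply foldl_stepA_const
  intro j hj
  rw [PySem.List.mem_pyRange_one] at hj
  have hij : i < j := by omega
  have hjm : j ≤ N / (N / i) := by omega
  have := calc_lt_block h2 hiN hsq hij hjm
  omega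

theorem findLoop_eq_fold (N : Int) : ∀ i ms bb, 2 ≤ i →
    findLoop N i ms bb = (PySem.List.pyRange i (N+1) 1).foldl (stepA N) (ms, bb) := by
  intro i ms bb
  fun_induction findLoop N i ms bb with
  | case1 i ms bb h q hsq s hgt ih =>
    intro hi2
    obtain ⟨hiN, -⟩ := h
    have hq : q = N / i := PySem.Int.floordiv_eq_ediv_of_pos (by omega)
    have hs : s = N - (i - 1) * q := rfl
    have hq1 : 1 ≤ q := by rw [hq]; exact (Int.le_ediv_iff_mul_le (by omega)).2 (by omega)
    have hm : PySem.Int.floordiv N q = N / q := PySem.Int.floordiv_eq_ediv_of_pos (by omega)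
    have him : i ≤ N / q := by
      rw [Int.le_ediv_iff_mul_le (by omega), hq]
      linarith [Int.ediv_mul_le N (show i ≠ 0 by omega), mul_comm i (N / i)]
    have hmN : N / q ≤ N := Int.ediv_le_self _ (by omega)
    have hcalc : calculation N i = s := by
      rw [hs, hq]; exact calculation_two_digit (by omega) hiN hsq
    rw [hm] at ih ⊢
    rw [PySem.List.pyRange_one_append i (N / q + 1) (N + 1) (by omega) (by omega),
      List.foldl_append,
      PySem.List.pyRange_one_cons (show i < N / q + 1 by omega)]
    simp only [List.foldl_cons]
    have hstep : stepA N (ms, bb) i = (s, i) := by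
      unfold stepA; rw [hcalc, if_pos hgt]
    rw [hstep, hq, fold_skip (s, i) (by omega) hiN hsq (le_of_eq (by rw [hs, hq])), ← hq]
    exact ih (by omega)
  | case2 i ms bb h q hsq s hgt ih =>
    intro hi2
    obtain ⟨hiN, -⟩ := h
    have hq : q = N / i := PySem.Int.floordiv_eq_ediv_of_pos (by omega)
    have hs : s = N - (i - 1) * q := rfl
    have hq1 : 1 ≤ q := by rw [hq]; exact (Int.le_ediv_iff_mul_le (by omega)).2 (by omega)
    have hm : PySem.Int.floordiv N q = N / q := PySem.Int.floordiv_eq_ediv_of_pos (by omega)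
    have him : i ≤ N / q := by
      rw [Int.le_ediv_iff_mul_le (by omega), hq]
      linarith [Int.ediv_mul_le N (show i ≠ 0 by omega), mul_comm i (N / i)]
    have hmN : N / q ≤ N := Int.ediv_le_self _ (by omega)
    have hcalc : calculation N i = s := by
      rw [hs, hq]; exact calculation_two_digit (by omega) hiN hsq
    rw [hm] at ih ⊢
    rw [PySem.List.pyRange_one_append i (N / q + 1) (N + 1) (by omega) (by omega),
      List.foldl_append,
      PySem.List.pyRange_one_cons (show i < N / q + 1 by omega)]
    simp only [List.foldl_cons]
    have hstep : stepA N (ms, bb) i = (ms, bb) := by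
      unfold stepA; rw [hcalc, if_neg hgt]
    have hms : N - (i - 1) * (N / i) ≤ ms := by rw [← hq, ← hs]; omega
    rw [hstep, hq, fold_skip (ms, bb) (by omega) hiN hsq hms, ← hq]
    exact ih (by omega)
  | case3 i ms bb h q s hgt ih =>
    intro hi2
    obtain ⟨hiN, -⟩ := h
    have hs : s = calculation N i := dsumLoop_eq_calcLoop N i 0
    rw [PySem.List.pyRange_one_cons (show i < N + 1 by omega)]
    simp only [List.foldl_cons]
    have hstep : stepA N (ms, bb) i = (s, i) := by
      unfold stepA; rw [← hs, if_pos hgt]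
    rw [hstep]
    exact ih (by omega)
  | case4 i ms bb h q s hgt ih =>
    intro hi2
    obtain ⟨hiN, -⟩ := h
    have hs : s = calculation N i := dsumLoop_eq_calcLoop N i 0
    rw [PySem.List.pyRange_one_cons (show i < N + 1 by omega)]
    simp only [List.foldl_cons]
    have hstep : stepA N (ms, bb) i = (ms, bb) := by
      unfold stepA; rw [← hs, if_neg hgt]
    rw [hstep]
    exact ih (by omega)
  | case5 i ms bb h =>
    intro hi2
    rw [PySem.List.pyRange_one_eq_nil (by omega)]
    rfl

-- ===== VERDICT (by name: the statement is the Claim_ definition above) =====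
theorem find_spec : Claim_equal_find := by
  intro N _
  unfold Spec_find find find_alt
  rw [findLoop_eq_fold N 2 0 2 (by omega)]
  rfl
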